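-- pv_equiv track=rewrite | github.com/seanchatmangpt/jotp | scripts/fix-dtr-final.py | add_missing_imports
-- ===== SOURCE A (Python) =====
-- def add_missing_imports(content: str) -> tuple[str, int]:
--     """Add missing imports for List, Map, etc. in DTR test files."""
--     lines = content.split('\n')
--     result = []
--     imports_to_add = []
--     i = 0
--
--     # Scan for usage of types without imports
--     has_list_usage = 'List.of(' in content or 'List<' in content
--     has_map_usage = 'Map.of(' in content or 'Map<' in content
--     has_timeout_exception = 'TimeoutException' in content
--
--     has_list_import = any('import java.util.List;' in line or 'import java.util.*;' in line for line in lines)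
--     has_map_import = any('import java.util.Map;' in line or 'import java.util.*;' in line for line in lines)
--     has_timeout_import = any('import java.util.concurrent.TimeoutException;' in line for line in lines)
--
--     if has_list_usage and not has_list_import:
--         imports_to_add.append('import java.util.List;')
--     if has_map_usage and not has_map_import:
--         imports_to_add.append('import java.util.Map;')
--     if has_timeout_exception and not has_timeout_import:
--         imports_to_add.append('import java.util.concurrent.TimeoutException;')
--
--     if not imports_to_add:
--         return content, 0
--
--     # Find the right place to add imports (after package, before class)
--     added = False
--     for i, line in enumerate(lines):
--         result.append(line)
--
--         if not added and line.startswith('package '):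
--             # Find where the imports block ends
--             j = i + 1
--             while j < len(lines) and (lines[j].startswith('import ') or not lines[j].strip() or lines[j].startswith('/*') or lines[j].startswith('*')):
--                 j += 1
--
--             # Insert new imports before the first non-import/blank line
--             for imp in imports_to_add:
--                 result.insert(j, imp)
--                 j += 1
--             added = True
--
--     return '\n'.join(result), len(imports_to_add)
-- ===== SOURCE B (Python) =====
-- def add_missing_imports(content: str) -> tuple[str, int]:
--     """Add missing imports for List, Map, etc. in DTR test files."""
--     lines = content.split('\n')
--
--     has_list_usage = 'List.of(' in content or 'List<' in content
--     has_map_usage = 'Map.of(' in content or 'Map<' in content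
--     has_timeout_exception = 'TimeoutException' in content
--
--     has_list_import = any('import java.util.List;' in line or 'import java.util.*;' in line for line in lines)
--     has_map_import = any('import java.util.Map;' in line or 'import java.util.*;' in line for line in lines)
--     has_timeout_import = any('import java.util.concurrent.TimeoutException;' in line for line in lines)
--
--     imports_to_add = []
--     if has_list_usage and not has_list_import:
--         imports_to_add.append('import java.util.List;')
--     if has_map_usage and not has_map_import:
--         imports_to_add.append('import java.util.Map;')
--     if has_timeout_exception and not has_timeout_import:
--         imports_to_add.append('import java.util.concurrent.TimeoutException;')
--
--     if not imports_to_add: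
--         return content, 0
--
--     # Splice the new imports right after the first 'package ' line (if any).
--     idx = None
--     for i, line in enumerate(lines):
--         if line.startswith('package '):
--             idx = i
--             break
--
--     if idx is None:
--         return content, len(imports_to_add)
--
--     new_lines = lines[:idx + 1] + imports_to_add + lines[idx + 1:]
--     return '\n'.join(new_lines), len(imports_to_add)
-- ===== Notes on version B (the rewrite author's own statement) =====
-- stated objective: simpler
-- what changed: A's append-every-line loop with a dead while-scan of the import block and repeated result.insert calls (which all land at the end of the still-short result list) is replaced by finding the index of the first package-declaration line and splicing the new imports in with one slice concatenation; the no-import and no-package cases return content directly.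
import Mathlib
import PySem

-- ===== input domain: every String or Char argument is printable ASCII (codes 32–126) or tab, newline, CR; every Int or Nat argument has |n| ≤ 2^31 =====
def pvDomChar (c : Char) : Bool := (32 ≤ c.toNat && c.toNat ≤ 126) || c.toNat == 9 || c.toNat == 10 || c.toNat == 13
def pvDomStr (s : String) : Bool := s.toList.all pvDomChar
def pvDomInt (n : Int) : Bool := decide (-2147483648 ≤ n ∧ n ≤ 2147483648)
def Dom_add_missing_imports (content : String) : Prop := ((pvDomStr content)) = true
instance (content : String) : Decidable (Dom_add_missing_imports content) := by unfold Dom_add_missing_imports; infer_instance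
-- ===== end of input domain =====

-- B replaces A's append-every-line loop (whose while-scan is dead code: its inserts always
-- land at the end of the still-short result) by one slice-splice after the first package line.

-- ===== PORT A =====

-- the while-loop scanning past the import block: 'while j < len(lines) and (…): j += 1'
def pvImportBlockLine (l : String) : Bool :=
  PySem.Str.startswith l "import " || (PySem.Str.strip l == "") ||
    PySem.Str.startswith l "/*" || PySem.Str.startswith l "*"

def pvWhileScan (lines : List String) (j : Nat) : Nat :=
  if h : j < lines.length then
    if pvImportBlockLine lines[j] then pvWhileScan lines (j + 1) else j
  else j
termination_by lines.length - j

-- 'for imp in imports_to_add: result.insert(j, imp); j += 1'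
def pvInsertLoop (imps : List String) (st : List String × Int) : List String × Int :=
  imps.foldl (fun st2 imp => (PySem.List.insert st2.1 st2.2 imp, st2.2 + 1)) st

-- one iteration of 'for i, line in enumerate(lines): …' over state (result, added)
def pvStepA (lines imps : List String) (st : List String × Bool) (p : Int × String) :
    List String × Bool :=
  let result := st.1 ++ [p.2]
  if !st.2 && PySem.Str.startswith p.2 "package " then
    -- j = i + 1 (enumerate indices are ≥ 0, so .toNat is exact)
    let j := pvWhileScan lines (p.1 + 1).toNat
    ((pvInsertLoop imps (result, (j : Int))).1, true)
  else (result, st.2)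

def add_missing_imports (content : String) : String × Int :=
  -- sep = "\n" is nonempty, so split? is always 'some': .getD [] is exact
  let lines := (PySem.Str.split? content "\n").getD []
  let has_list_usage := PySem.Str.isIn "List.of(" content || PySem.Str.isIn "List<" content
  let has_map_usage := PySem.Str.isIn "Map.of(" content || PySem.Str.isIn "Map<" content
  let has_timeout_exception := PySem.Str.isIn "TimeoutException" content
  let has_list_import := lines.any (fun line =>
    PySem.Str.isIn "import java.util.List;" line || PySem.Str.isIn "import java.util.*;" line)
  let has_map_import := lines.any (fun line =>
    PySem.Str.isIn "import java.util.Map;" line || PySem.Str.isIn "import java.util.*;" line)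
  let has_timeout_import := lines.any (fun line =>
    PySem.Str.isIn "import java.util.concurrent.TimeoutException;" line)
  let imports_to_add : List String :=
    (if has_list_usage && !has_list_import then ["import java.util.List;"] else []) ++
    (if has_map_usage && !has_map_import then ["import java.util.Map;"] else []) ++
    (if has_timeout_exception && !has_timeout_import then
      ["import java.util.concurrent.TimeoutException;"] else [])
  if imports_to_add.isEmpty then (content, 0)
  else
    let final := (PySem.List.enumerate lines 0).foldl (pvStepA lines imports_to_add) ([], false)
    (PySem.Str.join "\n" final.1, (imports_to_add.length : Int))

-- ===== PORT B =====
def add_missing_imports_alt (content : String) : String × Int :=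
  let lines := (PySem.Str.split? content "\n").getD []
  let has_list_usage := PySem.Str.isIn "List.of(" content || PySem.Str.isIn "List<" content
  let has_map_usage := PySem.Str.isIn "Map.of(" content || PySem.Str.isIn "Map<" content
  let has_timeout_exception := PySem.Str.isIn "TimeoutException" content
  let has_list_import := lines.any (fun line =>
    PySem.Str.isIn "import java.util.List;" line || PySem.Str.isIn "import java.util.*;" line)
  let has_map_import := lines.any (fun line =>
    PySem.Str.isIn "import java.util.Map;" line || PySem.Str.isIn "import java.util.*;" line)
  let has_timeout_import := lines.any (fun line =>
    PySem.Str.isIn "import java.util.concurrent.TimeoutException;" line)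
  let imports_to_add : List String :=
    (if has_list_usage && !has_list_import then ["import java.util.List;"] else []) ++
    (if has_map_usage && !has_map_import then ["import java.util.Map;"] else []) ++
    (if has_timeout_exception && !has_timeout_import then
      ["import java.util.concurrent.TimeoutException;"] else [])
  if imports_to_add.isEmpty then (content, 0)
  else
    match lines.findIdx? (fun l => PySem.Str.startswith l "package ") with
    | none => (content, (imports_to_add.length : Int))
    | some idx =>
        (PySem.Str.join "\n" (lines.take (idx + 1) ++ imports_to_add ++ lines.drop (idx + 1)),
         (imports_to_add.length : Int))

-- ===== PRECONDITION & SPEC =====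
def Spec_add_missing_imports (content : String) (out : String × Int) : Prop := out = add_missing_imports_alt content
instance (content : String) (out : String × Int) : Decidable (Spec_add_missing_imports content out) := by unfold Spec_add_missing_imports; infer_instance

-- ===== CLAIM (what is proved, stated in full; the proofs are below) =====
def Claim_equal_add_missing_imports : Prop := ∀ (content : String), Dom_add_missing_imports content → Spec_add_missing_imports content (add_missing_imports content)

-- ===== LEMMAS AND PROOFS =====

theorem pvWhileScan_ge (lines : List String) (j : Nat) : j ≤ pvWhileScan lines j := by
  fun_induction pvWhileScan lines j <;> omega

-- list.insert at a position ≥ length appends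
theorem pvInsert_of_le (xs : List String) (j : Int) (v : String)
    (h : (xs.length : Int) ≤ j) : PySem.List.insert xs j v = xs ++ [v] := by
  simp only [PySem.List.insert, PySem.List.sliceIndices]
  have h0 : ¬ (j < 0) := by omega
  simp only [if_neg h0]
  have : (min j (xs.length : Int)).toNat = xs.length := by omega
  simp [this]

theorem pvInsertLoop_of_le (imps : List String) : ∀ (res : List String) (j : Int),
    (res.length : Int) ≤ j → (pvInsertLoop imps (res, j)).1 = res ++ imps := by
  induction imps with
  | nil => intro res j _; simp [pvInsertLoop]
  | cons imp rest ih =>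
    intro res j h
    simp only [pvInsertLoop, List.foldl_cons] at *
    rw [pvInsert_of_le res j imp h]
    have := ih (res ++ [imp]) (j + 1) (by simp; omega)
    simpa using this

-- once added = true, the loop only appends the remaining lines
theorem pvFold_true (lines imps : List String) : ∀ (rest : List String) (s : Int)
    (acc : List String),
    (PySem.List.enumerate rest s).foldl (pvStepA lines imps) (acc, true) = (acc ++ rest, true) := by
  intro rest
  induction rest with
  | nil => intro s acc; simp [PySem.List.enumerate]
  | cons x xs ih =>
    intro s acc
    rw [PySem.List.enumerate_cons]
    simp only [List.foldl_cons]
    have hstep : pvStepA lines imps (acc, true) (s, x) = (acc ++ [x], true) := by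
      simp [pvStepA]
    rw [hstep, ih]
    simp

-- while added = false, the loop appends until the first package line, then splices imps after it
theorem pvFold_false (lines imps : List String) : ∀ (rest : List String) (s : Int)
    (acc : List String), 0 ≤ s → (acc.length : Int) ≤ s →
    ((PySem.List.enumerate rest s).foldl (pvStepA lines imps) (acc, false)).1 =
      match rest.findIdx? (fun l => PySem.Str.startswith l "package ") with
      | none => acc ++ rest
      | some m => acc ++ (rest.take (m + 1) ++ imps ++ rest.drop (m + 1)) := by
  intro rest
  induction rest with
  | nil => intro s acc _ _; simp [PySem.List.enumerate]
  | cons x xs ih =>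
    intro s acc hs hlen
    rw [PySem.List.enumerate_cons, List.foldl_cons, List.findIdx?_cons]
    by_cases hx : PySem.Str.startswith x "package "
    · have hstep : pvStepA lines imps (acc, false) (s, x) =
          (acc ++ [x] ++ imps, true) := by
        simp only [pvStepA, hx, Bool.not_false, Bool.and_true, if_true]
        have hj : ((acc ++ [x]).length : Int) ≤ ((pvWhileScan lines (s + 1).toNat : Nat) : Int) := by
          have := pvWhileScan_ge lines (s + 1).toNat
          simp only [List.length_append, List.length_cons, List.length_nil]
          omega
        rw [pvInsertLoop_of_le imps (acc ++ [x]) _ hj]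
      rw [hstep, pvFold_true, if_pos hx]
      simp
    · have hstep : pvStepA lines imps (acc, false) (s, x) = (acc ++ [x], false) := by
        simp only [pvStepA]
        have hx' : PySem.Str.startswith x "package " = false := Bool.not_eq_true _ |>.mp hx
        simp at hx'
        simp [hx']
      rw [hstep, ih (s + 1) (acc ++ [x]) (by omega) (by simp; omega), if_neg hx]
      cases h : xs.findIdx? (fun l => PySem.Str.startswith l "package ") with
      | none => simp
      | some m => simp

-- ===== join / split roundtrip =====

-- flatten-with-separator form of intercalate
theorem pvF_cons (sep a : List Char) (t : List (List Char)) :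
    sep.intercalate (a :: t) = a ++ (t.map (sep ++ ·)).flatten := by
  simp only [List.intercalate]
  induction t generalizing a <;> simp_all [List.intersperse]

theorem pvGo_flat (sep : List Char) (fuel : Nat) (l cur : List Char)
    (acc : List (List Char)) :
    ((PySem.Chars.splitOn.go sep fuel l cur acc).map (sep ++ ·)).flatten =
      (acc.reverse.map (sep ++ ·)).flatten ++ sep ++ cur.reverse ++ l := by
  induction fuel, l, cur, acc using PySem.Chars.splitOn.go.induct sep with
  | case1 l cur acc =>
    rw [PySem.Chars.splitOn.go]
    simp
  | case2 t cur acc ht =>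
    cases t with
    | zero => exact absurd rfl ht
    | succ t =>
      rw [PySem.Chars.splitOn.go]
      · simp
      · omega
  | case3 fuel c rest cur acc hpre ih =>
    have hcr : c :: rest = sep ++ List.drop sep.length (c :: rest) :=
      (List.prefix_iff_eq_append.mp (List.isPrefixOf_iff_prefix.mp hpre)).symm
    rw [PySem.Chars.splitOn.go]
    simp only [hpre, if_true, ih]
    conv_rhs => rw [hcr]
    simp [List.append_assoc]
  | case4 fuel c rest cur acc hpre ih =>
    rw [PySem.Chars.splitOn.go]
    rw [if_neg hpre, ih]
    simp

theorem pvGo_ne_nil (sep : List Char) (fuel : Nat) (l cur : List Char)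
    (acc : List (List Char)) : PySem.Chars.splitOn.go sep fuel l cur acc ≠ [] := by
  induction fuel, l, cur, acc using PySem.Chars.splitOn.go.induct sep with
  | case1 l cur acc => rw [PySem.Chars.splitOn.go]; simp
  | case2 t cur acc ht =>
    cases t with
    | zero => exact absurd rfl ht
    | succ t =>
      rw [PySem.Chars.splitOn.go]
      · simp
      · omega
  | case3 fuel c rest cur acc hpre ih => rw [PySem.Chars.splitOn.go]; simpa [hpre] using ih
  | case4 fuel c rest cur acc hpre ih => rw [PySem.Chars.splitOn.go]; simpa [hpre] using ih

theorem pvJoin_splitOn (sep s : List Char) :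
    PySem.Chars.join sep (PySem.Chars.splitOn s sep) = s := by
  unfold PySem.Chars.join PySem.Chars.splitOn
  have hflat := pvGo_flat sep (s.length + 1) s [] []
  cases h : PySem.Chars.splitOn.go sep (s.length + 1) s [] [] with
  | nil => exact absurd h (pvGo_ne_nil sep _ s [] [])
  | cons a t =>
    rw [h] at hflat
    simp only [List.map_nil, List.flatten_nil, List.nil_append, List.append_nil,
      List.reverse_nil] at hflat
    rw [pvF_cons]
    simp only [List.map_cons, List.flatten_cons] at hflat
    have : sep ++ (a ++ (t.map (sep ++ ·)).flatten) = sep ++ s := by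
      rw [← List.append_assoc]; exact hflat
    exact List.append_cancel_left this

theorem pvStrJoin_split (content : String) :
    PySem.Str.join "\n" ((PySem.Str.split? content "\n").getD []) = content := by
  simp only [PySem.Str.split?, PySem.Chars.split?]
  rw [if_neg (by decide)]
  simp only [Option.map_some, Option.getD_some, PySem.Str.join]
  have hmap : (List.map String.toList
      (List.map String.ofList (PySem.Chars.splitOn content.toList "\n".toList))) =
      PySem.Chars.splitOn content.toList "\n".toList := by
    simp [List.map_map, Function.comp_def, String.toList_ofList]
  rw [hmap, pvJoin_splitOn]
  exact String.ofList_toList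

-- the two result lists agree line for line
theorem pvMain (lines imps : List String) :
    ((PySem.List.enumerate lines 0).foldl (pvStepA lines imps) ([], false)).1 =
      match lines.findIdx? (fun l => PySem.Str.startswith l "package ") with
      | none => lines
      | some idx => lines.take (idx + 1) ++ imps ++ lines.drop (idx + 1) := by
  have := pvFold_false lines imps lines 0 [] (by omega) (by simp)
  rw [this]
  cases h : lines.findIdx? (fun l => PySem.Str.startswith l "package ") <;> simp

-- both ports, after the shared flag computation, reduced side by side
theorem pvCore (lines imps : List String) (content : String)
    (hlines : lines = (PySem.Str.split? content "\n").getD []) :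
    (if imps.isEmpty then ((content, 0) : String × Int) else
      (PySem.Str.join "\n"
        ((PySem.List.enumerate lines 0).foldl (pvStepA lines imps) ([], false)).1,
       (imps.length : Int))) =
    (if imps.isEmpty then ((content, 0) : String × Int) else
      match lines.findIdx? (fun l => PySem.Str.startswith l "package ") with
      | none => (content, (imps.length : Int))
      | some idx =>
          (PySem.Str.join "\n" (lines.take (idx + 1) ++ imps ++ lines.drop (idx + 1)),
           (imps.length : Int))) := by
  by_cases he : imps.isEmpty
  · rw [if_pos he, if_pos he]
  · rw [if_neg he, if_neg he, pvMain]
    cases h : lines.findIdx? (fun l => PySem.Str.startswith l "package ") with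
    | none => rw [hlines, pvStrJoin_split]
    | some idx => rfl

-- ===== VERDICT (by name: the statement is the Claim_ definition above) =====
theorem add_missing_imports_spec : Claim_equal_add_missing_imports := by
  intro content _
  unfold Spec_add_missing_imports
  show add_missing_imports content = add_missing_imports_alt content
  simp only [add_missing_imports, add_missing_imports_alt]
  exact pvCore _ _ content rfl
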